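-- pv_equiv track=rewrite | github.com/Jeeyeonn/Algorithm | 프로그래머스/성격유형검사_220923.py | solution
-- ===== SOURCE A (Python) =====
-- def solution(survey, choices):
--     answer = ''
--     sums = {"R": 0, "T": 0, "C": 0, "F": 0, "J": 0, "M": 0, "A": 0, "N": 0}
--
--     for i in range(len(survey)):
--         a, b = survey[i][0], survey[i][1]
--
--         if choices[i] == 1:
--             sums[a] += 3
--         elif choices[i] == 2:
--             sums[a] += 2
--         elif choices[i] == 3:
--             sums[a] += 1
--         elif choices[i] == 5:
--             sums[b] += 1
--         elif choices[i] == 6: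
--             sums[b] += 2
--         elif choices[i] == 7:
--             sums[b] += 3
--
--     if (sums["R"] >= sums["T"]):
--         answer += "R"
--     else:
--         answer += "T"
--
--     if (sums["C"] >= sums["F"]):
--         answer += "C"
--     else:
--         answer += "F"
--
--     if (sums["J"] >= sums["M"]):
--         answer += "J"
--     else:
--         answer += "M"
--
--     if (sums["A"] >= sums["N"]):
--         answer += "A"
--     else:
--         answer += "N"
--
--     return answer
-- ===== SOURCE B (Python) =====
-- AXES = ("RT", "CF", "JM", "AN")
--
--
-- def _score(survey, choices, ch):
--     """Total weight the answers award to the single letter ch."""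
--     total = 0
--     for s, c in zip(survey, choices):
--         if s[0] == ch and 1 <= c <= 3:
--             total += 4 - c
--         elif s[1] == ch and 5 <= c <= 7:
--             total += c - 4
--     return total
--
--
-- def solution(survey, choices):
--     # four independent axis decisions, each letter scored by its own reduction
--     return ''.join(x if _score(survey, choices, x) >= _score(survey, choices, y) else y
--                    for x, y in AXES)
-- ===== Notes on version B (the rewrite author's own statement) =====
-- stated objective: alternative
-- what changed: B drops A's mutable 8-counter dict and its single accumulating pass: it decides each of the four axes independently, scoring each letter with its own pure reduction over the answers (a per-letter scan parameterised by the letter) and joining the four winners; no dictionary or shared state is kept.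
import Mathlib
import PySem

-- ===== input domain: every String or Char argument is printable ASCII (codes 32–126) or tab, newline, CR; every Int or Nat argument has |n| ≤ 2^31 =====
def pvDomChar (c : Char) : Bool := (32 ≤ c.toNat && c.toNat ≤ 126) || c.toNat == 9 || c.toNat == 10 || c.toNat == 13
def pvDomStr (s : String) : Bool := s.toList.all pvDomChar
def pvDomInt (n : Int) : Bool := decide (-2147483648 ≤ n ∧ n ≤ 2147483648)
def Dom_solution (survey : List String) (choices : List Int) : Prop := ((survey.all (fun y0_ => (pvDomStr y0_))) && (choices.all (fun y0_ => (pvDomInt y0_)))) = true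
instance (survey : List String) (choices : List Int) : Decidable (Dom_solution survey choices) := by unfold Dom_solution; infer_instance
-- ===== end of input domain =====

-- B drops A's mutable 8-counter dict and single accumulating pass: each axis is decided
-- independently by scoring each letter with its own pure reduction over the answers
-- (objective: alternative; same O(n) cost).

-- ===== PORT A =====
-- sums[k] += v : KeyError (none) when k is not a key
def updA (d : PySem.Dict Char Int) (k : Char) (v : Int) : Option (PySem.Dict Char Int) :=
  match d.get? k with
  | none => none
  | some w => some (d.insert k (w + v))

-- the if/elif chain of A's loop body
def stepA (sums : PySem.Dict Char Int) (a b : Char) (c : Int) : Option (PySem.Dict Char Int) :=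
  if c = 1 then updA sums a 3
  else if c = 2 then updA sums a 2
  else if c = 3 then updA sums a 1
  else if c = 5 then updA sums b 1
  else if c = 6 then updA sums b 2
  else if c = 7 then updA sums b 3
  else some sums

-- 'for i in range(len(survey)): a, b = survey[i][0], survey[i][1]; …'; none = a raised IndexError/KeyError
def loopA (survey : List String) (choices : List Int) :
    List Int → PySem.Dict Char Int → Option (PySem.Dict Char Int)
  | [], sums => some sums
  | i :: rest, sums =>
    match PySem.List.pyGet? survey i with
    | none => none
    | some s =>
      match PySem.Str.pyGet? s 0, PySem.Str.pyGet? s 1 with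
      | some a, some b =>
        match PySem.List.pyGet? choices i with
        | none => none
        | some c => (stepA sums a b c).bind (loopA survey choices rest)
      | _, _ => none

def initSums : PySem.Dict Char Int :=
  PySem.Dict.ofList [('R', 0), ('T', 0), ('C', 0), ('F', 0), ('J', 0), ('M', 0), ('A', 0), ('N', 0)]

def solution (survey : List String) (choices : List Int) : String :=
  match loopA survey choices (PySem.List.pyRange 0 survey.length 1) initSums with
  | none => ""   -- the Python raises on these inputs; excluded by Pre_solution
  | some sums =>
    -- sums["R"] etc. cannot raise: the 8 keys are never removed, so getD is exact here
    let answer := ""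
    let answer := answer ++ (if sums.getD 'R' 0 ≥ sums.getD 'T' 0 then "R" else "T")
    let answer := answer ++ (if sums.getD 'C' 0 ≥ sums.getD 'F' 0 then "C" else "F")
    let answer := answer ++ (if sums.getD 'J' 0 ≥ sums.getD 'M' 0 then "J" else "M")
    let answer := answer ++ (if sums.getD 'A' 0 ≥ sums.getD 'N' 0 then "A" else "N")
    answer

-- ===== PORT B =====
-- the loop of _score: if s[0]==ch and 1<=c<=3: … elif s[1]==ch and 5<=c<=7: …
-- none = s[0]/s[1] raised IndexError (s[1] is only read when the first test fails, as in Python)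
def scoreLoop (ch : Char) : List (String × Int) → Int → Option Int
  | [], total => some total
  | (s, c) :: rest, total =>
    match PySem.Str.pyGet? s 0 with
    | none => none
    | some a =>
      if a = ch ∧ 1 ≤ c ∧ c ≤ 3 then scoreLoop ch rest (total + (4 - c))
      else
        match PySem.Str.pyGet? s 1 with
        | none => none
        | some b =>
          if b = ch ∧ 5 ≤ c ∧ c ≤ 7 then scoreLoop ch rest (total + (c - 4))
          else scoreLoop ch rest total

-- _score(survey, choices, ch)
def scoreB (survey : List String) (choices : List Int) (ch : Char) : Option Int :=
  scoreLoop ch (survey.zip choices) 0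

-- one axis (x, y) of the join: x if _score(x) >= _score(y) else y
def axisB (survey : List String) (choices : List Int) (x y : Char) : Option Char :=
  match scoreB survey choices x, scoreB survey choices y with
  | some sx, some sy => some (if sx ≥ sy then x else y)
  | _, _ => none

def solution_alt (survey : List String) (choices : List Int) : String :=
  match axisB survey choices 'R' 'T', axisB survey choices 'C' 'F',
        axisB survey choices 'J' 'M', axisB survey choices 'A' 'N' with
  | some l1, some l2, some l3, some l4 => String.ofList [l1, l2, l3, l4]
  | _, _, _, _ => ""   -- the Python raises on these inputs

-- ===== PRECONDITION & SPEC =====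
def pvKeys : List Char := ['R', 'T', 'C', 'F', 'J', 'M', 'A', 'N']

def itemOK (p : String × Int) : Bool :=
  match p.1.toList with
  | a :: b :: _ =>
      (!(p.2 == 1 || p.2 == 2 || p.2 == 3) || pvKeys.contains a) &&
      (!(p.2 == 5 || p.2 == 6 || p.2 == 7) || pvKeys.contains b)
  | _ => false

-- Exactly the inputs on which A returns: choices at least as long as survey (else IndexError),
-- every survey item has ≥ 2 characters (else IndexError), and the letter a choice selects is
-- one of the 8 personality keys (else KeyError).
def Pre_solution (survey : List String) (choices : List Int) : Prop :=
  survey.length ≤ choices.length ∧ ∀ p ∈ survey.zip choices, itemOK p = true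

instance (survey : List String) (choices : List Int) : Decidable (Pre_solution survey choices) := by
  unfold Pre_solution; infer_instance

def pvWitness_solution : List String × List Int := (["RT", "FC"], [1, 6])

def Spec_solution (survey : List String) (choices : List Int) (out : String) : Prop := out = solution_alt survey choices
instance (survey : List String) (choices : List Int) (out : String) : Decidable (Spec_solution survey choices out) := by unfold Spec_solution; infer_instance

-- ===== CLAIM (what is proved, stated in full; the proofs are below) =====
def Claim_equal_solution : Prop := ∀ (survey : List String) (choices : List Int), Dom_solution survey choices → Pre_solution survey choices → Spec_solution survey choices (solution survey choices)

-- ===== LEMMAS AND PROOFS =====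

-- per-item contribution of one (survey string, choice) pair to letter ch's score
def itemScore (ch : Char) (p : String × Int) : Int :=
  (if decide (1 ≤ p.2) && decide (p.2 ≤ 3) && (PySem.Str.pyGet? p.1 0 == some ch) then 4 - p.2 else 0)
  + (if decide (5 ≤ p.2) && decide (p.2 ≤ 7) && (PySem.Str.pyGet? p.1 1 == some ch) then p.2 - 4 else 0)

theorem pyGet01 (s : String) (a b : Char) (tl : List Char) (hs : s.toList = a :: b :: tl) :
    PySem.Str.pyGet? s 0 = some a ∧ PySem.Str.pyGet? s 1 = some b := by
  constructor <;>
    simp [PySem.Str.pyGet?, hs, PySem.List.pyGet?, PySem.List.pyIdx?,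
      show ((0 : Int) ≤ ↑tl.length + 1) from by omega]

theorem updA_spec (d : PySem.Dict Char Int) (k : Char) (v w : Int) (hk : d.get? k = some w) :
    updA d k v = some (d.insert k (w + v)) ∧
      ∀ ch, (d.insert k (w + v)).get? ch = (d.get? ch).map (· + if k = ch then v else 0) := by
  refine ⟨by simp [updA, hk], fun ch => ?_⟩
  rw [PySem.Dict.get?_insert]
  by_cases h : k = ch
  · subst h; simp [hk]
  · rw [if_neg (fun hh => h hh.symm)]
    cases d.get? ch <;> simp [h]

theorem itemScore_first (s : String) (a b : Char) (tl : List Char) (hs : s.toList = a :: b :: tl)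
    (c : Int) (hlo : 1 ≤ c) (hhi : c ≤ 3) :
    ∀ ch, itemScore ch (s, c) = if a = ch then 4 - c else 0 := by
  intro ch
  obtain ⟨ha, hb⟩ := pyGet01 s a b tl hs
  have e2 : (decide (5 ≤ c) && decide (c ≤ 7)) = false := by
    simp [show ¬(5 ≤ c) from by omega]
  simp only [itemScore, ha, hb, e2, Bool.false_and, Bool.and_eq_true,
    decide_eq_true_eq, if_false, add_zero, beq_iff_eq, Option.some.injEq]
  by_cases hac : a = ch <;> simp [hac, hlo, hhi]

theorem itemScore_second (s : String) (a b : Char) (tl : List Char) (hs : s.toList = a :: b :: tl)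
    (c : Int) (hlo : 5 ≤ c) (hhi : c ≤ 7) :
    ∀ ch, itemScore ch (s, c) = if b = ch then c - 4 else 0 := by
  intro ch
  obtain ⟨ha, hb⟩ := pyGet01 s a b tl hs
  have e1 : (decide (1 ≤ c) && decide (c ≤ 3)) = false := by
    simp [show ¬(c ≤ 3) from by omega]
  simp only [itemScore, ha, hb, e1, Bool.false_and, Bool.and_eq_true,
    decide_eq_true_eq, if_false, zero_add, beq_iff_eq, Option.some.injEq]
  by_cases hbc : b = ch <;> simp [hbc, hlo, hhi]

theorem itemScore_none (s : String) (a b : Char) (tl : List Char) (hs : s.toList = a :: b :: tl)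
    (c : Int) (h13 : ¬(1 ≤ c ∧ c ≤ 3)) (h57 : ¬(5 ≤ c ∧ c ≤ 7)) :
    ∀ ch, itemScore ch (s, c) = 0 := by
  intro ch
  obtain ⟨ha, hb⟩ := pyGet01 s a b tl hs
  have e1 : (decide (1 ≤ c) && decide (c ≤ 3)) = false := by
    by_cases hc : 1 ≤ c
    · simp [hc, show ¬(c ≤ 3) from by omega]
    · simp [hc]
  have e2 : (decide (5 ≤ c) && decide (c ≤ 7)) = false := by
    by_cases hc : 5 ≤ c
    · simp [hc, show ¬(c ≤ 7) from by omega]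
    · simp [hc]
  simp [itemScore, ha, hb, e1, e2]

theorem stepA_spec (d : PySem.Dict Char Int) (s : String) (a b : Char) (tl : List Char) (c : Int)
    (hs : s.toList = a :: b :: tl) (hok : itemOK (s, c) = true)
    (hkeys : ∀ ch ∈ pvKeys, (d.get? ch).isSome) :
    ∃ d', stepA d a b c = some d' ∧
      ∀ ch, d'.get? ch = (d.get? ch).map (· + itemScore ch (s, c)) := by
  simp only [itemOK, hs, Bool.and_eq_true, Bool.or_eq_true, Bool.not_eq_true',
    Bool.or_eq_false_iff, beq_eq_false_iff_ne, ne_eq, List.contains_eq_mem, decide_eq_true_eq] at hok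
  rcases hok with ⟨hok1, hok2⟩
  have getw : ∀ k ∈ pvKeys, ∃ w, d.get? k = some w := by
    intro k hk
    have := hkeys k hk
    cases h : d.get? k
    · rw [h] at this; simp at this
    · exact ⟨_, rfl⟩
  by_cases h1 : c = 1
  · obtain ⟨w, hw⟩ := getw a (by tauto)
    obtain ⟨he, hg⟩ := updA_spec d a 3 w hw
    refine ⟨d.insert a (w + 3), by simp [stepA, h1, he], fun ch => ?_⟩
    rw [hg ch, itemScore_first s a b tl hs c (by omega) (by omega) ch, h1]
    norm_num
  · by_cases h2 : c = 2
    · obtain ⟨w, hw⟩ := getw a (by tauto)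
      obtain ⟨he, hg⟩ := updA_spec d a 2 w hw
      refine ⟨d.insert a (w + 2), by simp [stepA, h1, h2, he], fun ch => ?_⟩
      rw [hg ch, itemScore_first s a b tl hs c (by omega) (by omega) ch, h2]
      norm_num
    · by_cases h3 : c = 3
      · obtain ⟨w, hw⟩ := getw a (by tauto)
        obtain ⟨he, hg⟩ := updA_spec d a 1 w hw
        refine ⟨d.insert a (w + 1), by simp [stepA, h1, h2, h3, he], fun ch => ?_⟩
        rw [hg ch, itemScore_first s a b tl hs c (by omega) (by omega) ch, h3]
        norm_num
      · by_cases h5 : c = 5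
        · obtain ⟨w, hw⟩ := getw b (by tauto)
          obtain ⟨he, hg⟩ := updA_spec d b 1 w hw
          refine ⟨d.insert b (w + 1), by simp [stepA, h1, h2, h3, h5, he], fun ch => ?_⟩
          rw [hg ch, itemScore_second s a b tl hs c (by omega) (by omega) ch, h5]
          norm_num
        · by_cases h6 : c = 6
          · obtain ⟨w, hw⟩ := getw b (by tauto)
            obtain ⟨he, hg⟩ := updA_spec d b 2 w hw
            refine ⟨d.insert b (w + 2), by simp [stepA, h1, h2, h3, h5, h6, he], fun ch => ?_⟩
            rw [hg ch, itemScore_second s a b tl hs c (by omega) (by omega) ch, h6]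
            norm_num
          · by_cases h7 : c = 7
            · obtain ⟨w, hw⟩ := getw b (by tauto)
              obtain ⟨he, hg⟩ := updA_spec d b 3 w hw
              refine ⟨d.insert b (w + 3), by simp [stepA, h1, h2, h3, h5, h6, h7, he], fun ch => ?_⟩
              rw [hg ch, itemScore_second s a b tl hs c (by omega) (by omega) ch, h7]
              norm_num
            · refine ⟨d, by simp [stepA, h1, h2, h3, h5, h6, h7], fun ch => ?_⟩
              rw [itemScore_none s a b tl hs c (by omega) (by omega) ch]
              cases d.get? ch <;> simp

-- A's loop re-expressed directly on the zipped pairs (proof-side spine)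
def loopZ : List (String × Int) → PySem.Dict Char Int → Option (PySem.Dict Char Int)
  | [], d => some d
  | (s, c) :: rest, d =>
    match PySem.Str.pyGet? s 0, PySem.Str.pyGet? s 1 with
    | some a, some b => (stepA d a b c).bind (loopZ rest)
    | _, _ => none

theorem loopZ_spec : ∀ (l : List (String × Int)) (d : PySem.Dict Char Int),
    (∀ p ∈ l, itemOK p = true) → (∀ ch ∈ pvKeys, (d.get? ch).isSome) →
    ∃ e, loopZ l d = some e ∧
      ∀ ch, e.get? ch = (d.get? ch).map (· + (l.map (itemScore ch)).sum) := by
  intro l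
  induction l with
  | nil => exact fun d _ _ => ⟨d, rfl, fun ch => by cases d.get? ch <;> simp⟩
  | cons p l ih =>
    intro d hok hkeys
    obtain ⟨s, c⟩ := p
    have hokp : itemOK (s, c) = true := hok _ (List.mem_cons_self)
    cases hs : s.toList with
    | nil => simp [itemOK, hs] at hokp
    | cons a rest =>
      cases rest with
      | nil => simp [itemOK, hs] at hokp
      | cons b tl =>
        obtain ⟨ha, hb⟩ := pyGet01 s a b tl hs
        obtain ⟨d', hstep, hrel⟩ := stepA_spec d s a b tl c hs hokp hkeys
        have hkeys' : ∀ ch ∈ pvKeys, (d'.get? ch).isSome := by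
          intro ch hch
          rw [hrel ch]
          have := hkeys ch hch
          cases h : d.get? ch
          · rw [h] at this; simp at this
          · simp
        obtain ⟨e, he, hrel2⟩ := ih d' (fun q hq => hok q (List.mem_cons_of_mem _ hq)) hkeys'
        refine ⟨e, ?_, fun ch => ?_⟩
        · simp only [loopZ, ha, hb, hstep, Option.bind_some]; exact he
        · rw [hrel2 ch, hrel ch]
          cases d.get? ch <;> simp [add_assoc]

theorem loopA_eq_loopZ : ∀ (sv : List String) (cs : List Int) (pre : List String) (preC : List Int),
    pre.length = preC.length → sv.length ≤ cs.length → ∀ d : PySem.Dict Char Int,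
    loopA (pre ++ sv) (preC ++ cs)
        (PySem.List.pyRange (pre.length : Int) ((pre.length : Int) + (sv.length : Int)) 1) d
      = loopZ (sv.zip cs) d := by
  intro sv
  induction sv with
  | nil =>
    intro cs pre preC _ _ d
    simp only [List.length_nil, Nat.cast_zero, add_zero]
    rw [PySem.List.pyRange_one_eq_nil (by omega)]
    simp [loopA, loopZ]
  | cons s sv' ih =>
    intro cs pre preC hc hlen d
    cases cs with
    | nil => simp at hlen
    | cons c cs' =>
      rw [show ((pre.length : Int) + ((s :: sv').length : Int))
            = ((pre.length : Int) + 1) + (sv'.length : Int) from by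
          push_cast [List.length_cons]; ring]
      rw [PySem.List.pyRange_one_cons (by omega)]
      have hgs : PySem.List.pyGet? (pre ++ s :: sv') (pre.length : Int) = some s := by
        rw [PySem.List.pyGet?_natCast]
        simp [List.getElem?_append_right]
      have hgc : PySem.List.pyGet? (preC ++ c :: cs') (pre.length : Int) = some c := by
        rw [hc, PySem.List.pyGet?_natCast]
        simp [List.getElem?_append_right]
      rw [List.zip_cons_cons]
      simp only [loopA, PySem.Str.pyGet?, PySem.Chars.pyGet?_eq_listPyGet?, hgs, hgc]
      cases h0 : PySem.List.pyGet? s.toList 0 with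
      | none => simp [loopZ, PySem.Str.pyGet?, h0]
      | some a =>
        cases h1 : PySem.List.pyGet? s.toList 1 with
        | none => simp [loopZ, PySem.Str.pyGet?, h0, h1]
        | some b =>
          simp only [loopZ, PySem.Str.pyGet?, PySem.Chars.pyGet?_eq_listPyGet?, h0, h1]
          cases hst : stepA d a b c with
          | none => simp
          | some d'' =>
            simp only [Option.bind_some]
            have hrest := ih cs' (pre ++ [s]) (preC ++ [c])
              (by simp [hc]) (by simp only [List.length_cons] at hlen; omega) d''
            simp only [List.append_assoc, List.singleton_append] at hrest
            rw [show (((pre ++ [s]).length : Int)) = (pre.length : Int) + 1 from by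
              push_cast [List.length_append, List.length_singleton]; ring] at hrest
            exact hrest

theorem initSums_keys : ∀ ch ∈ pvKeys, (initSums.get? ch).isSome := by
  intro ch hch; fin_cases hch <;> rfl

-- B's per-letter reduction computes the sum of the same per-item contributions
theorem scoreLoop_spec (ch : Char) : ∀ (l : List (String × Int)) (t : Int),
    (∀ p ∈ l, itemOK p = true) →
    scoreLoop ch l t = some (t + (l.map (itemScore ch)).sum) := by
  intro l
  induction l with
  | nil => intro t _; simp [scoreLoop]
  | cons p l ih =>
    intro t hok
    obtain ⟨s, c⟩ := p
    have hokp : itemOK (s, c) = true := hok _ (List.mem_cons_self)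
    cases hs : s.toList with
    | nil => simp [itemOK, hs] at hokp
    | cons a rest =>
      cases rest with
      | nil => simp [itemOK, hs] at hokp
      | cons b tl =>
        obtain ⟨ha, hb⟩ := pyGet01 s a b tl hs
        have htl : ∀ t' : Int, scoreLoop ch l t' = some (t' + (l.map (itemScore ch)).sum) :=
          fun t' => ih t' (fun q hq => hok q (List.mem_cons_of_mem _ hq))
        simp only [scoreLoop, ha, hb, List.map_cons, List.sum_cons]
        by_cases hcnd1 : a = ch ∧ 1 ≤ c ∧ c ≤ 3
        · rw [if_pos hcnd1, htl _,
            itemScore_first s a b tl hs c hcnd1.2.1 hcnd1.2.2 ch, if_pos hcnd1.1]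
          congr 1; ring
        · rw [if_neg hcnd1]
          by_cases hcnd2 : b = ch ∧ 5 ≤ c ∧ c ≤ 7
          · rw [if_pos hcnd2, htl _,
              itemScore_second s a b tl hs c hcnd2.2.1 hcnd2.2.2 ch, if_pos hcnd2.1]
            congr 1; ring
          · rw [if_neg hcnd2, htl _]
            by_cases h13 : 1 ≤ c ∧ c ≤ 3
            · rw [itemScore_first s a b tl hs c h13.1 h13.2 ch,
                if_neg (fun hac => hcnd1 ⟨hac, h13⟩)]
              ring_nf
            · by_cases h57 : 5 ≤ c ∧ c ≤ 7
              · rw [itemScore_second s a b tl hs c h57.1 h57.2 ch,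
                  if_neg (fun hbc => hcnd2 ⟨hbc, h57⟩)]
                ring_nf
              · rw [itemScore_none s a b tl hs c h13 h57 ch]
                ring_nf

theorem solution_spec : Claim_equal_solution := by
  intro survey choices _ hpre
  obtain ⟨hlen, hok⟩ := hpre
  unfold Spec_solution
  -- A side
  obtain ⟨e, he, hrel⟩ := loopZ_spec (survey.zip choices) initSums hok initSums_keys
  have hbA : loopA survey choices (PySem.List.pyRange 0 (survey.length : Int) 1) initSums = some e := by
    have h00 := loopA_eq_loopZ survey choices [] [] rfl hlen initSums
    simp only [List.nil_append, List.length_nil, Nat.cast_zero, zero_add] at h00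
    rw [h00, he]
  have hval : ∀ ch : Char, initSums.get? ch = some 0 →
      e.getD ch 0 = ((survey.zip choices).map (itemScore ch)).sum := by
    intro ch h0
    rw [PySem.Dict.getD_eq_get?_getD, hrel ch, h0]
    simp
  -- B side
  have hsc : ∀ ch : Char, scoreB survey choices ch
      = some (((survey.zip choices).map (itemScore ch)).sum) := by
    intro ch
    rw [scoreB, scoreLoop_spec ch _ 0 hok, zero_add]
  unfold solution solution_alt axisB
  rw [hbA]
  simp only [hsc 'R', hsc 'T', hsc 'C', hsc 'F', hsc 'J', hsc 'M', hsc 'A', hsc 'N']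
  rw [hval 'R' rfl, hval 'T' rfl, hval 'C' rfl, hval 'F' rfl,
    hval 'J' rfl, hval 'M' rfl, hval 'A' rfl, hval 'N' rfl]
  split_ifs <;> rfl
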